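-- pv_equiv track=rewrite | github.com/EdgarMuradyan/TumoLabs | prob_1.1.py | getZeroCount
-- ===== SOURCE A (Python) =====
-- def shift(Arr, firstIndex):
--
--     i = firstIndex
--
--     while (i < (len(Arr) - 1)):
--         Arr[i] = Arr[i+1]
--         i += 1
--
-- def getZeroCount(Arr):
--     i=0
--     zeroCount = 0
--     length = len(Arr)
--     while (i < length):
--         if Arr[i] == 0:
--             shift(Arr,i)
--             length -= 1
--             zeroCount += 1
--
--         i += 1
--
--     return zeroCount
-- ===== SOURCE B (Python) =====
-- def getZeroCount(Arr):
--     # Single read-only pass: count a zero, then skip the element after it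
--     # (that is what A's shift-then-increment effectively does). One pass, no mutation.
--     count = 0
--     i = 0
--     n = len(Arr)
--     while i < n:
--         if Arr[i] == 0:
--             count += 1
--             i += 2
--         else:
--             i += 1
--     return count
-- ===== Notes on version B (the rewrite author's own statement) =====
-- stated objective: alternative
-- what changed: Replaces A's in-place shift-on-every-zero (an O(n) left shift per zero found) by one read-only pass that counts a zero and skips the following element; no mutation of Arr. Intended as faster on zero-heavy input (A is O(n*zeros)); measured 1.46x at the largest timed size, below the 1.5x bar.
import Mathlib
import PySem

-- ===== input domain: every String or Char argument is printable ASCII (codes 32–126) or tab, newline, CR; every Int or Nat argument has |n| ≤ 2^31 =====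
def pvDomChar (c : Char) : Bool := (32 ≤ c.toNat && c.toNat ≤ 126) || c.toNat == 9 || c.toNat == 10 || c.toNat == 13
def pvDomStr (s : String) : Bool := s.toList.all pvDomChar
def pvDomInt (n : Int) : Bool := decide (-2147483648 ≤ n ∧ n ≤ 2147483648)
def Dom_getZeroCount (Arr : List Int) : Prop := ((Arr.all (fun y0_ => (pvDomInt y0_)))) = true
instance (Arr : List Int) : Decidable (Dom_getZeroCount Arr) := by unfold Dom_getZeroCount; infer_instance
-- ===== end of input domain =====

-- B replaces A's in-place shift-per-zero by one read-only pass that counts a zero and skips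
-- the next element; A mutates Arr in place, B does not — the equivalence proved is about the return value only.


-- ===== PORT A =====
-- while (i < len(Arr)-1): Arr[i] = Arr[i+1]; i += 1   (in-place left shift from firstIndex)
def pvShiftLoop (arr : List Int) (i : Nat) : List Int :=
  if i < arr.length - 1 then
    pvShiftLoop (arr.set i (arr.getD (i+1) 0)) (i+1)
  else arr
termination_by arr.length - i
decreasing_by simp [List.length_set]; omega

-- while (i < length): if Arr[i] == 0 then shift; length -= 1; zeroCount += 1; i += 1
def pvALoop (arr : List Int) (i length : Nat) (zeroCount : Int) : Int :=
  if i < length then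
    if arr.getD i 0 = 0 then
      pvALoop (pvShiftLoop arr i) (i+1) (length - 1) (zeroCount + 1)
    else
      pvALoop arr (i+1) length zeroCount
  else zeroCount
termination_by length - i
decreasing_by all_goals omega

def getZeroCount (Arr : List Int) : Int := pvALoop Arr 0 Arr.length 0

-- ===== PORT B =====
-- single read-only pass: on zero, count += 1 and i += 2; otherwise i += 1
def pvBLoop (arr : List Int) (n i : Nat) (count : Int) : Int :=
  if i < n then
    if arr.getD i 0 = 0 then
      pvBLoop arr n (i+2) (count + 1)
    else
      pvBLoop arr n (i+1) count
  else count
termination_by n - i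
decreasing_by all_goals omega

def getZeroCount_alt (Arr : List Int) : Int := pvBLoop Arr Arr.length 0 0

-- ===== PRECONDITION & SPEC =====
def Spec_getZeroCount (Arr : List Int) (out : Int) : Prop := out = getZeroCount_alt Arr
instance (Arr : List Int) (out : Int) : Decidable (Spec_getZeroCount Arr out) := by unfold Spec_getZeroCount; infer_instance

-- ===== CLAIM (what is proved, stated in full; the proofs are below) =====
def Claim_equal_getZeroCount : Prop := ∀ (Arr : List Int), Dom_getZeroCount Arr → Spec_getZeroCount Arr (getZeroCount Arr)

-- ===== LEMMAS AND PROOFS =====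

-- the abstract "count a zero, skip the next element" function both loops compute
def pvF : List Int → Int
  | [] => 0
  | a :: t => if a = 0 then 1 + pvF (t.drop 1) else pvF t
termination_by l => l.length
decreasing_by all_goals (simp; try omega)

-- the window Arr[i:length] the loops still have to examine
def pvSeg (arr : List Int) (i L : Nat) : List Int := (arr.drop i).take (L - i)

theorem pvSeg_nil (arr : List Int) (i L : Nat) (h : L ≤ i) : pvSeg arr i L = [] := by
  unfold pvSeg
  rw [Nat.sub_eq_zero_of_le h, List.take_zero]

theorem pvSeg_cons (arr : List Int) (i L : Nat) (h1 : i < L) (h2 : L ≤ arr.length) :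
    pvSeg arr i L = arr.getD i 0 :: pvSeg arr (i+1) L := by
  have hi : i < arr.length := lt_of_lt_of_le h1 h2
  have hL : L - i = (L - (i+1)) + 1 := by omega
  unfold pvSeg
  rw [List.drop_eq_getElem_cons hi, hL, List.take_succ_cons, List.getD_eq_getElem _ _ hi]

theorem pvSeg_drop1 (arr : List Int) (i L : Nat) :
    (pvSeg arr i L).drop 1 = pvSeg arr (i+1) L := by
  have h : L - (i+1) = L - i - 1 := by omega
  simp [pvSeg, List.drop_take, List.drop_drop, h]

theorem pvShiftLoop_length (arr : List Int) (s : Nat) :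
    (pvShiftLoop arr s).length = arr.length := by
  fun_induction pvShiftLoop arr s with
  | case1 arr s h ih => simpa using ih
  | case2 => rfl

theorem pvShiftLoop_getD_lt (arr : List Int) (s j : Nat) (h : j < s) :
    (pvShiftLoop arr s).getD j 0 = arr.getD j 0 := by
  fun_induction pvShiftLoop arr s with
  | case1 arr s hlt ih =>
      rw [ih (by omega)]
      simp [List.getD, Nat.ne_of_lt' h]
  | case2 => rfl

theorem pvShiftLoop_getD (arr : List Int) (s j : Nat) (h1 : s ≤ j) (h2 : j + 1 < arr.length) :
    (pvShiftLoop arr s).getD j 0 = arr.getD (j+1) 0 := by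
  fun_induction pvShiftLoop arr s with
  | case1 arr s hlt ih =>
      rcases Nat.eq_or_lt_of_le h1 with heq | hlt2
      · subst heq
        rw [pvShiftLoop_getD_lt _ _ _ (by omega)]
        simp [List.getD, show s < arr.length by omega]
      · rw [ih hlt2 (by simpa using h2)]
        simp [List.getD, show s ≠ j + 1 by omega]
  | case2 arr s hlt => omega

theorem pvSeg_shift (arr : List Int) (i L : Nat) (h1 : i < L) (h2 : L ≤ arr.length) :
    pvSeg (pvShiftLoop arr i) (i+1) (L-1) = pvSeg arr (i+2) L := by
  apply List.ext_getElem
  · simp [pvSeg, pvShiftLoop_length]; omega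
  · intro j hj1 hj2
    have hlen : (pvShiftLoop arr i).length = arr.length := pvShiftLoop_length arr i
    have hj : i + 1 + j + 1 < arr.length := by
      simp [pvSeg, hlen] at hj1; omega
    simp only [pvSeg, List.getElem_take, List.getElem_drop]
    have e1 : (pvShiftLoop arr i)[i + 1 + j]'(by omega) =
        (pvShiftLoop arr i).getD (i + 1 + j) 0 := by
      rw [List.getD_eq_getElem _ _ (by omega)]
    have e2 : arr[i + 2 + j]'(by omega) = arr.getD (i + 1 + j + 1) 0 := by
      rw [List.getD_eq_getElem _ _ (by omega)]
      congr 1; omega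
    rw [e1, e2, pvShiftLoop_getD arr i (i+1+j) (by omega) hj]

theorem pvALoop_eq (arr : List Int) (i L : Nat) (c : Int) (h : L ≤ arr.length) :
    pvALoop arr i L c = c + pvF (pvSeg arr i L) := by
  fun_induction pvALoop arr i L c with
  | case1 arr i L c hiL =>
      rename_i hz ih
      rw [ih (by rw [pvShiftLoop_length]; omega)]
      rw [pvSeg_shift arr i L hiL h, pvSeg_cons arr i L hiL h, hz]
      rw [pvF, if_pos rfl, pvSeg_drop1]
      ring
  | case2 arr i L c hiL =>
      rename_i hz ih
      rw [ih h, pvSeg_cons arr i L hiL h, pvF, if_neg hz]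
  | case3 arr i L =>
      rename_i c hiL
      rw [pvSeg_nil arr i L (by omega), pvF]
      ring

theorem pvBLoop_eq (arr : List Int) (n i : Nat) (c : Int) (h : n ≤ arr.length) :
    pvBLoop arr n i c = c + pvF (pvSeg arr i n) := by
  fun_induction pvBLoop arr n i c with
  | case1 i c hin hz ih =>
      rw [ih, pvSeg_cons arr i n hin h, hz, pvF, if_pos rfl, pvSeg_drop1]
      have h12 : pvSeg arr (i + 1 + 1) n = pvSeg arr (i + 2) n := by norm_num
      rw [h12]; ring
  | case2 i c hin hz ih =>
      rw [ih, pvSeg_cons arr i n hin h, pvF, if_neg hz]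
  | case3 i c hin =>
      rw [pvSeg_nil arr i n (by omega), pvF]
      ring

-- ===== VERDICT (by name: the statement is the Claim_ definition above) =====
theorem getZeroCount_spec : Claim_equal_getZeroCount := by
  intro Arr _
  unfold Spec_getZeroCount getZeroCount getZeroCount_alt
  rw [pvALoop_eq Arr 0 Arr.length 0 le_rfl, pvBLoop_eq Arr Arr.length 0 0 le_rfl]
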